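-- pv_equiv track=rewrite | github.com/Tdavide04/PythonLearning | LeetCode/2461)MaximumSumOfDistinctSubarraysWithLengthK.py | maximumSubarraySum
-- ===== SOURCE A (Python) =====
-- def maximumSubarraySum(nums: list[int], k: int) -> int:
--     window: list[int] = nums[:k]
--
--     curr_sum = sum(window)
--     max_sum = curr_sum
--     for right in range(k, len(nums)):
--         window.pop(0)
--         if nums[right] in window:
--             window.append(nums[right])
--         else:
--             window.append(nums[right])
--             curr_sum += nums[right]
--             curr_sum -= nums[right - k]
--             if curr_sum > max_sum:
--                 max_sum = curr_sum
--     return max_sum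
-- ===== SOURCE B (Python) =====
-- def maximumSubarraySum(nums: list[int], k: int) -> int:
--     # Two staged passes: first precompute prev[i] = index of the previous
--     # occurrence of nums[i] (or -1), then a max-prefix scan over the window
--     # deltas; the condition "nums[j] occurs among the k-1 preceding elements"
--     # becomes the arithmetic test prev[j] >= j-k+1, so no window container
--     # (neither a list nor a counter) is maintained during the scan.
--     n = len(nums)
--     prev = []
--     last = {}
--     for i in range(n):
--         prev.append(last.get(nums[i], -1))
--         last[nums[i]] = i
--     best = curr = sum(nums[:k])
--     for j in range(k, n):
--         if prev[j] < j - k + 1: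
--             curr += nums[j] - nums[j - k]
--             if curr > best:
--                 best = curr
--     return best
-- ===== Notes on version B (the rewrite author's own statement) =====
-- stated objective: faster
-- what changed: Replaces A's maintained window list with its per-step O(k) membership scan by two staged passes: a precomputed previous-occurrence index array (one dict pass), then a max-prefix scan where the duplicate test is the arithmetic comparison prev[j] >= j-k+1, so no window container exists during the scan.
-- outside the precondition, e.g. on maximumSubarraySum([2, -3, -3], -1): A returns 4, B raises IndexError
import Mathlib
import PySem

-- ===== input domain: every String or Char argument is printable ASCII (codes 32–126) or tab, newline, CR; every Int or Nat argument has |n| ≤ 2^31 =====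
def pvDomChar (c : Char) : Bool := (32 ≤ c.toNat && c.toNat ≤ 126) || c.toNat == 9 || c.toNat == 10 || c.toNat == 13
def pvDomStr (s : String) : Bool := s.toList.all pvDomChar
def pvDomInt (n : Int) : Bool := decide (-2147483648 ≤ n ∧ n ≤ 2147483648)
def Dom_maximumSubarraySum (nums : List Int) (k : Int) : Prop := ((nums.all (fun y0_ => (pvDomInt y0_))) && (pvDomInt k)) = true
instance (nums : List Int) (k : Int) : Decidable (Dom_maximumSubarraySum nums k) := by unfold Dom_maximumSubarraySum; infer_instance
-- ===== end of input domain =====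

-- B replaces A's maintained window list (O(k) membership scan per step) with a
-- precomputed previous-occurrence index array plus a max-prefix scan (objective: faster).


-- ===== PORT A =====
-- loop body of A's for-loop, as a helper (window, curr_sum, max_sum)
def pvStepA (nums : List Int) (k : Int) (st : List Int × Int × Int) (right : Int) : List Int × Int × Int :=
  let w := st.1.tail                                -- window.pop(0)  (nonempty under Pre_)
  let x := PySem.List.pyGetD nums right 0           -- nums[right]    (in range under Pre_)
  if w.contains x then
    (w ++ [x], st.2.1, st.2.2)
  else
    let c := st.2.1 + x - PySem.List.pyGetD nums (right - k) 0
    (w ++ [x], c, if c > st.2.2 then c else st.2.2)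

def maximumSubarraySum (nums : List Int) (k : Int) : Int :=
  let window := PySem.List.slice nums none (some k)
  ((PySem.List.pyRange k (nums.length : Int) 1).foldl (pvStepA nums k)
    (window, window.sum, window.sum)).2.2

-- ===== PORT B =====
-- pass 1 body: prev.append(last.get(nums[i], -1)); last[nums[i]] = i
def pvStep1 (nums : List Int) (st : List Int × PySem.Dict Int Int) (i : Int) :
    List Int × PySem.Dict Int Int :=
  let x := PySem.List.pyGetD nums i 0
  (st.1 ++ [st.2.getD x (-1)], st.2.insert x i)

-- pass 2 body: if prev[j] < j-k+1: curr += nums[j]-nums[j-k]; best = max(best, curr)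
def pvStep2 (nums : List Int) (k : Int) (prev : List Int) (cb : Int × Int) (j : Int) : Int × Int :=
  if PySem.List.pyGetD prev j 0 < j - k + 1 then
    let c := cb.1 + PySem.List.pyGetD nums j 0 - PySem.List.pyGetD nums (j - k) 0
    (c, if c > cb.2 then c else cb.2)
  else cb

def maximumSubarraySum_alt (nums : List Int) (k : Int) : Int :=
  let prev := ((PySem.List.pyRange 0 (nums.length : Int) 1).foldl (pvStep1 nums)
    ([], PySem.Dict.empty)).1
  let curr := (PySem.List.slice nums none (some k)).sum
  ((PySem.List.pyRange k (nums.length : Int) 1).foldl (pvStep2 nums k prev) (curr, curr)).2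

-- ===== PRECONDITION & SPEC =====
-- Pre_ restricts to the natural domain k ≥ 1 (plus the trivial nums = [], k = 0 case):
-- for other k, A raises IndexError on most inputs (pop from an empty list, nums[right-k]
-- out of range) and returns elsewhere only by accident of negative-index wraparound,
-- where B's own indexing raises IndexError.
def Pre_maximumSubarraySum (nums : List Int) (k : Int) : Prop :=
  1 ≤ k ∨ (nums = [] ∧ k = 0)
instance (nums : List Int) (k : Int) : Decidable (Pre_maximumSubarraySum nums k) := by
  unfold Pre_maximumSubarraySum; infer_instance

def pvWitness_maximumSubarraySum : List Int × Int := ([1, 2, 1, 3], 2)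

def Spec_maximumSubarraySum (nums : List Int) (k : Int) (out : Int) : Prop := out = maximumSubarraySum_alt nums k
instance (nums : List Int) (k : Int) (out : Int) : Decidable (Spec_maximumSubarraySum nums k out) := by unfold Spec_maximumSubarraySum; infer_instance

-- ===== CLAIM (what is proved, stated in full; the proofs are below) =====
def Claim_equal_maximumSubarraySum : Prop := ∀ (nums : List Int) (k : Int), Dom_maximumSubarraySum nums k → Pre_maximumSubarraySum nums k → Spec_maximumSubarraySum nums k (maximumSubarraySum nums k)

-- ===== LEMMAS AND PROOFS =====

-- "p is the previous-occurrence index of nums[j] before j (or -1)"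
def pvQ (nums : List Int) (j : ℕ) (p : Int) : Prop :=
  (∀ t : ℕ, t < j → p < (t : Int) → nums.getD t 0 ≠ nums.getD j 0) ∧
  (p = -1 ∨ ∃ t : ℕ, t < j ∧ (t : Int) = p ∧ nums.getD t 0 = nums.getD j 0)

-- "d maps each value to its last occurrence index below m (default -1)"
def pvLastInv (nums : List Int) (m : ℕ) (d : PySem.Dict Int Int) : Prop :=
  ∀ x : Int,
    (∀ t : ℕ, t < m → d.getD x (-1) < (t : Int) → nums.getD t 0 ≠ x) ∧
    (d.getD x (-1) = -1 ∨ ∃ t : ℕ, t < m ∧ (t : Int) = d.getD x (-1) ∧ nums.getD t 0 = x)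

-- pass 1 invariant: after processing indices 0..m-1, prev has length m, each
-- prev[j] is the previous occurrence of nums[j], and the dict records last occurrences
theorem pv_pass1 (nums : List Int) : ∀ m : ℕ, m ≤ nums.length →
    let st := (PySem.List.pyRange 0 (m : Int) 1).foldl (pvStep1 nums) ([], PySem.Dict.empty)
    st.1.length = m ∧ pvLastInv nums m st.2 ∧
      (∀ j : ℕ, j < m → pvQ nums j (st.1.getD j 0)) := by
  intro m
  induction m with
  | zero =>
      intro _
      simp only [Nat.cast_zero, PySem.List.pyRange_one_eq_nil le_rfl, List.foldl_nil]
      refine ⟨rfl, ?_, by omega⟩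
      intro x
      refine ⟨?_, Or.inl (by simp [PySem.Dict.getD, PySem.Dict.get?, PySem.Dict.empty])⟩
      intro t ht
      exact absurd ht (Nat.not_lt_zero t)
  | succ m ih =>
      intro hm
      obtain ⟨hlen, hlast, hq⟩ := ih (by omega)
      have hsplit : PySem.List.pyRange 0 ((m + 1 : ℕ) : Int) 1
          = PySem.List.pyRange 0 (m : Int) 1 ++ [(m : Int)] := by
        rw [show ((m + 1 : ℕ) : Int) = (m : Int) + 1 from by push_cast; ring]
        exact PySem.List.pyRange_one_succ_right (by omega)
      rw [hsplit, List.foldl_append]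
      set st := (PySem.List.pyRange 0 (m : Int) 1).foldl (pvStep1 nums) ([], PySem.Dict.empty)
        with hst
      simp only [List.foldl_cons, List.foldl_nil, pvStep1,
        PySem.List.pyGetD_natCast]
      set x := nums.getD m 0 with hx
      refine ⟨by simp [hlen], ?_, ?_⟩
      · -- dict invariant for m+1
        intro y
        rcases hlast y with ⟨hno, hocc⟩
        by_cases hxy : x = y
        · subst hxy
          constructor
          · intro t ht hlt
            rw [PySem.Dict.getD_insert] at hlt
            simp only [if_true] at hlt
            omega
          · right
            exact ⟨m, by omega, by rw [PySem.Dict.getD_insert]; simp, rfl⟩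
        · have hg : (st.2.insert x (m : Int)).getD y (-1) = st.2.getD y (-1) := by
            rw [PySem.Dict.getD_insert, if_neg (by simpa using fun h : y = x => hxy h.symm)]
          constructor
          · intro t ht hlt
            rw [hg] at hlt
            rcases Nat.lt_succ_iff_lt_or_eq.mp ht with h | h
            · exact hno t h hlt
            · subst h; exact fun he => hxy he
          · rw [hg]
            rcases hocc with h | ⟨t, ht, he, hv⟩
            · exact Or.inl h
            · exact Or.inr ⟨t, by omega, he, hv⟩
      · -- prev entries
        intro j hj
        rcases Nat.lt_succ_iff_lt_or_eq.mp hj with h | h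
        · have : (st.1 ++ [st.2.getD x (-1)]).getD j 0 = st.1.getD j 0 := by
            simp only [List.getD_eq_getElem?_getD,
              List.getElem?_append_left (by omega : j < st.1.length)]
          rw [this]
          exact hq j h
        · subst h
          have : (st.1 ++ [st.2.getD x (-1)]).getD j 0 = st.2.getD x (-1) := by
            simp only [List.getD_eq_getElem?_getD, List.getElem?_append_right (by omega : st.1.length ≤ j),
              hlen, Nat.sub_self]
            simp
          rw [this]
          rcases hlast x with ⟨hno, hocc⟩
          exact ⟨fun t ht hlt => hno t ht hlt, hocc⟩

-- membership in a drop/take slice, stated by indices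
theorem pv_mem_drop_take (nums : List Int) (a b : ℕ) (x : Int) :
    x ∈ (nums.drop a).take b ↔
      ∃ t : ℕ, a ≤ t ∧ t < a + b ∧ t < nums.length ∧ nums.getD t 0 = x := by
  constructor
  · intro h
    obtain ⟨i, hi, he⟩ := List.mem_iff_getElem.mp h
    have hi' : i < b ∧ a + i < nums.length := by
      simp only [List.length_take, List.length_drop, lt_min_iff] at hi
      omega
    refine ⟨a + i, by omega, by omega, hi'.2, ?_⟩
    rw [List.getD_eq_getElem nums 0 hi'.2, ← he,
      List.getElem_take, List.getElem_drop]
  · rintro ⟨t, h1, h2, h3, h4⟩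
    apply List.mem_iff_getElem?.mpr
    refine ⟨t - a, ?_⟩
    rw [List.getElem?_take_of_lt (by omega), List.getElem?_drop,
      show a + (t - a) = t from by omega, List.getElem?_eq_getElem h3,
      ← List.getD_eq_getElem nums 0 h3, h4]

-- the arithmetic test prev[j] < j-k+1 is exactly "nums[j] not among the k-1 preceding"
theorem pv_cond (nums : List Int) (k : Int) (hk : 1 ≤ k) (j : ℕ) (p : Int)
    (hkj : k.toNat ≤ j) (hjn : j < nums.length) (hQ : pvQ nums j p) :
    (p < (j : Int) - k + 1 ↔
      nums.getD j 0 ∉ (nums.drop (j - k.toNat + 1)).take (k.toNat - 1)) := by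
  have hkk : ((k.toNat : ℕ) : Int) = k := Int.toNat_of_nonneg (by omega)
  constructor
  · intro hlt hmem
    obtain ⟨t, h1, h2, h3, h4⟩ := (pv_mem_drop_take _ _ _ _).mp hmem
    exact hQ.1 t (by omega) (by omega) h4
  · intro hmem
    by_contra hlt
    have hge : (j : Int) - k + 1 ≤ p := not_lt.mp hlt
    rcases hQ.2 with h | ⟨t, ht, he, hv⟩
    · omega
    · exact hmem ((pv_mem_drop_take _ _ _ _).mpr ⟨t, by omega, by omega, by omega, hv⟩)

-- main loop: A's windowed fold equals B's prefix scan over prev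
theorem pv_loop (nums : List Int) (k : Int) (hk : 1 ≤ k) (prevL : List Int)
    (hQ : ∀ j : ℕ, j < nums.length → pvQ nums j (prevL.getD j 0)) :
    ∀ (m i : ℕ), k.toNat ≤ i → i + m = nums.length →
    ∀ (stA : List Int × Int × Int) (cb : Int × Int),
    stA.1 = (nums.drop (i - k.toNat)).take k.toNat →
    stA.2.1 = cb.1 → stA.2.2 = cb.2 →
    ((PySem.List.pyRange (i : Int) (nums.length : Int) 1).foldl (pvStepA nums k) stA).2.2
      = ((PySem.List.pyRange (i : Int) (nums.length : Int) 1).foldl (pvStep2 nums k prevL) cb).2 := by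
  intro m
  induction m with
  | zero =>
      intro i hki hm stA cb hW hc hb
      rw [PySem.List.pyRange_one_eq_nil (by omega : (nums.length : Int) ≤ (i : Int))]
      simp only [List.foldl_nil]
      exact hb
  | succ m ih =>
      intro i hki hm stA cb hW hc hb
      have hk1 : 1 ≤ k.toNat := by omega
      have hin : i < nums.length := by omega
      have hilt : (i : Int) < (nums.length : Int) := by exact_mod_cast hin
      have hkk : ((k.toNat : ℕ) : Int) = k := Int.toNat_of_nonneg (by omega)
      rw [PySem.List.pyRange_one_cons hilt]
      simp only [List.foldl_cons]
      have hcast : (i : Int) + 1 = ((i + 1 : ℕ) : Int) := by push_cast; ring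
      rw [hcast]
      have hx : PySem.List.pyGetD nums (i : Int) 0 = nums.getD i 0 :=
        PySem.List.pyGetD_natCast nums i 0
      have hwt : stA.1.tail = (nums.drop (i - k.toNat + 1)).take (k.toNat - 1) := by
        rw [hW, ← List.drop_one, List.drop_take, List.drop_drop]
      have hnew : stA.1.tail ++ [nums.getD i 0]
          = (nums.drop (i + 1 - k.toNat)).take k.toNat := by
        rw [hwt, show i + 1 - k.toNat = i - k.toNat + 1 from by omega]
        set s := nums.drop (i - k.toNat + 1) with hs
        conv_rhs => rw [show k.toNat = (k.toNat - 1) + 1 from by omega]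
        rw [List.take_add_one]
        congr 1
        rw [hs, List.getElem?_drop, show i - k.toNat + 1 + (k.toNat - 1) = i from by omega,
           List.getElem?_eq_getElem hin]
        simp [List.getElem?_eq_getElem hin]
      have hcond : prevL.getD i 0 < (i : Int) - k + 1
          ↔ stA.1.tail.contains (nums.getD i 0) = false := by
        rw [pv_cond nums k hk i (prevL.getD i 0) hki hin (hQ i hin), ← hwt]
        simp
      apply ih (i + 1) (by omega) (by omega)
      · -- window shape preserved
        simp only [pvStepA, hx]
        split <;> exact hnew
      · -- curr components evolve identically
        simp only [pvStepA, pvStep2, hx,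
          PySem.List.pyGetD_natCast prevL i 0]
        by_cases hm' : stA.1.tail.contains (nums.getD i 0)
        · rw [if_pos hm', if_neg (fun hlt => by
            have := hcond.mp hlt
            rw [hm'] at this
            exact absurd this (by simp))]
          exact hc
        · rw [if_neg hm', if_pos (hcond.mpr (by simpa using hm'))]
          simp only [hc]
      · -- best components evolve identically
        simp only [pvStepA, pvStep2, hx,
          PySem.List.pyGetD_natCast prevL i 0]
        by_cases hm' : stA.1.tail.contains (nums.getD i 0)
        · rw [if_pos hm', if_neg (fun hlt => by
            have := hcond.mp hlt
            rw [hm'] at this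
            exact absurd this (by simp))]
          exact hb
        · rw [if_neg hm', if_pos (hcond.mpr (by simpa using hm'))]
          simp only [hc, hb]

-- ===== VERDICT (by name: the statement is the Claim_ definition above) =====
theorem maximumSubarraySum_spec : Claim_equal_maximumSubarraySum := by
  intro nums k _hdom hpre
  unfold Spec_maximumSubarraySum
  rcases hpre with hk | ⟨hnil, hk0⟩
  · simp only [maximumSubarraySum, maximumSubarraySum_alt]
    obtain ⟨hlen, _, hq⟩ := pv_pass1 nums nums.length le_rfl
    set prevL := ((PySem.List.pyRange 0 (nums.length : Int) 1).foldl (pvStep1 nums)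
      ([], PySem.Dict.empty)).1 with hprev
    have hQ : ∀ j : ℕ, j < nums.length → pvQ nums j (prevL.getD j 0) := hq
    have hkk : ((k.toNat : ℕ) : Int) = k := Int.toNat_of_nonneg (by omega)
    by_cases hle : k.toNat ≤ nums.length
    · rw [show PySem.List.pyRange k (nums.length : Int) 1
            = PySem.List.pyRange ((k.toNat : ℕ) : Int) (nums.length : Int) 1 from by rw [hkk]]
      apply pv_loop nums k hk prevL hQ (nums.length - k.toNat) k.toNat le_rfl (by omega)
      · rw [PySem.List.slice_to nums (by omega : (0:Int) ≤ k)]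
        simp
      · rfl
      · rfl
    · rw [PySem.List.pyRange_one_eq_nil (by omega : (nums.length : Int) ≤ k)]
      simp only [List.foldl_nil]
  · subst hnil; subst hk0
    decide
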